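-- pv_equiv track=rewrite | github.com/pypi-data/pypi-mirror-80 | packages/spectron/spectron-0.4.8-py3-none-any.whl/spectron/MaxDict.py | detect_mixed_array_parents
-- ===== SOURCE A (Python) =====
-- from itertools import chain
-- from typing import AbstractSet, Dict, Generator, List, Optional, Tuple, Union
--
-- def get_array_parents(field_key: Tuple[str]) -> Generator[Tuple[str], None, None]:
--     """Get all array parent keys."""
--
--     ix = 0
--     for _ in range(field_key.count("[array]")):
--         ix = field_key.index("[array]", ix)
--         yield field_key[:ix]
--         ix += 1
--
-- def loc_siblings(
--     parent_key: Tuple[str], keys: List[Tuple[str]], is_array: Optional[bool] = None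
-- ) -> List[Tuple[str]]:
--     """Locate Field keys which share a parent key."""
--
--     if is_array is not None:
--         if is_array:
--             comp = lambda k: k == "[array]"
--         else:
--             comp = lambda k: k != "[array]"
--     else:
--         comp = lambda k: True
--
--     res = []
--     num_parents = len(parent_key)
--     for k in keys:
--         if len(k) > num_parents:
--             if k[:num_parents] == parent_key and comp(k[num_parents]):
--                 res.append(k)
--     return res
--
-- def detect_mixed_array_parents(
--     keys: List[Tuple[str]]
-- ) -> AbstractSet[Tuple[str]]:
--     """Detect parent keys which have array and non-array children.
--
--     Example using dot notation:
--
--         terminal keys: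
--             - a.b.[array].d
--             - a.b.c.d
--         mixed array parent:
--             - a.b
--     """
--
--     array_keys = [k for k in keys if "[array]" in k]
--     array_parents = sorted(
--         set(chain(*map(get_array_parents, array_keys))), key=lambda t: len(t)
--     )
--
--     mixed_array_parents = set()
--     for parent_key in array_parents:
--         non_array_siblings = loc_siblings(parent_key, keys, is_array=False)
--         if non_array_siblings:
--             mixed_array_parents.add(parent_key)
--
--     return mixed_array_parents
-- ===== SOURCE B (Python) =====
-- def detect_mixed_array_parents(keys):
--     """Detect parent keys which have array and non-array children.
--
--     One pass over all key prefixes: collect the set of parents with a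
--     non-array child and the (deduped) list of array parents, then intersect.
--     """
--     non_array_parents = {k[:i] for k in keys for i in range(len(k)) if k[i] != "[array]"}
--     all_array_parents = [k[:i] for k in keys for i in range(len(k)) if k[i] == "[array]"]
--     array_parents = sorted(dict.fromkeys(all_array_parents), key=len)
--     return {p for p in array_parents if p in non_array_parents}
-- ===== Notes on version B (the rewrite author's own statement) =====
-- stated objective: alternative
-- what changed: B makes one pass over all key prefixes to build the set of parents with a non-array child and the ordered deduped list of array parents, replacing A's per-array-parent rescan of the whole key list (loc_siblings); it trades A's per-parent key-list scans for prefix tables whose size is the total squared key length.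
import Mathlib
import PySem

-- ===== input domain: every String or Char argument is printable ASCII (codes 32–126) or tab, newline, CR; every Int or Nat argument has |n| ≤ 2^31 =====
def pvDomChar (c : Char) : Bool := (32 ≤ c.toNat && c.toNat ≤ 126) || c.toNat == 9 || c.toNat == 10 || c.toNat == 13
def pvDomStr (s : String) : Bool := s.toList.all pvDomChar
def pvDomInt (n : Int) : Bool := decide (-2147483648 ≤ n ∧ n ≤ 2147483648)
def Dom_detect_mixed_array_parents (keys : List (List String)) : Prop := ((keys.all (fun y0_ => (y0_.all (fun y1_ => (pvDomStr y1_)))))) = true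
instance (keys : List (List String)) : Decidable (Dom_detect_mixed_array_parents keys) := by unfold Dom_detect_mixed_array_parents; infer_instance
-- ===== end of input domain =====

-- B replaces A's per-array-parent rescan of the whole key list with prefix tables built in
-- one pass over all key prefixes (objective: alternative). Return-value equivalence; no mutation.

-- ===== PORT A =====
-- field_key.index("[array]", ix): first index ≥ ix holding the value (none = ValueError, unreachable below)
def pvListIndexFrom (xs : List String) (tgt : String) (start : Nat) : Option Nat :=
  match PySem.List.index? (xs.drop start) tgt with
  | some j => some (start + j)
  | none => none

-- the 'for _ in range(field_key.count("[array]"))' loop of get_array_parents;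
-- field_key[:ix] with ix ≥ 0 is List.take ix (exact for a nonnegative slice bound)
def pvGetArrayParentsAux (key : List String) : Nat → Nat → List (List String)
  | _, 0 => []
  | ix, n+1 =>
    match pvListIndexFrom key "[array]" ix with
    | some j => key.take j :: pvGetArrayParentsAux key (j + 1) n
    | none => []   -- unreachable: the loop count bounds the number of occurrences

def get_array_parents (key : List String) : List (List String) :=
  pvGetArrayParentsAux key 0 (PySem.List.count key "[array]")

-- k[:num_parents] is take (nonnegative bound); k[num_parents] is getD, in range under the length guard
def loc_siblings (parent_key : List String) (keys : List (List String)) (is_array : Option Bool) :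
    List (List String) :=
  let comp : String → Bool :=
    match is_array with
    | some true => fun k => k == "[array]"
    | some false => fun k => k != "[array]"
    | none => fun _ => true
  let num_parents := parent_key.length
  keys.foldl (fun res k =>
    if k.length > num_parents then
      if k.take num_parents == parent_key && comp (k.getD num_parents "") then res ++ [k]
      else res
    else res) []

def detect_mixed_array_parents (keys : List (List String)) : List (List String) :=
  let array_keys := keys.filter (fun k => k.contains "[array]")
  let array_parents :=
    PySem.List.sorted (PySem.Set.ofList (array_keys.flatMap get_array_parents)) (fun t => t.length) false
  array_parents.foldl
    (fun s p => if loc_siblings p keys (some false) = [] then s else PySem.Set.add s p)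
    PySem.Set.empty

-- ===== PORT B =====
-- the comprehension '[k[:i] for i in range(len(k)) if (k[i] == "[array]") is <isArr>]'
def prefixesWhere (k : List String) (isArr : Bool) : List (List String) :=
  (List.range k.length).filterMap (fun i =>
    if ((k.getD i "") == "[array]") == isArr then some (k.take i) else none)

def detect_mixed_array_parents_alt (keys : List (List String)) : List (List String) :=
  let nonArrayParents : PySem.Set (List String) :=
    PySem.Set.ofList (keys.flatMap (fun k => prefixesWhere k false))
  let allArrayParents := keys.flatMap (fun k => prefixesWhere k true)
  let arrayParents := PySem.List.sorted (PySem.List.dedup allArrayParents) (fun t => t.length) false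
  PySem.Set.ofList (arrayParents.filter (fun p => PySem.Set.contains nonArrayParents p))

-- ===== PRECONDITION & SPEC =====
def Spec_detect_mixed_array_parents (keys : List (List String)) (out : List (List String)) : Prop := out = detect_mixed_array_parents_alt keys
instance (keys : List (List String)) (out : List (List String)) : Decidable (Spec_detect_mixed_array_parents keys out) := by unfold Spec_detect_mixed_array_parents; infer_instance

-- ===== CLAIM (what is proved, stated in full; the proofs are below) =====
def Claim_equal_detect_mixed_array_parents : Prop := ∀ (keys : List (List String)), Dom_detect_mixed_array_parents keys → Spec_detect_mixed_array_parents keys (detect_mixed_array_parents keys)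

-- ===== LEMMAS AND PROOFS =====

-- splitting the position filter at the first hit
theorem range_filter_step (len ix j : Nat) (P : Nat → Bool)
    (h1 : ix + j < len) (h2 : P (ix + j) = true)
    (h3 : ∀ m, ix ≤ m → m < ix + j → P m = false) :
    (List.range len).filter (fun i => decide (ix ≤ i) && P i)
      = (ix + j) :: (List.range len).filter (fun i => decide (ix + j + 1 ≤ i) && P i) := by
  induction len with
  | zero => omega
  | succ len ih =>
    rw [List.range_succ, List.filter_append, List.filter_append]
    rcases Nat.lt_succ_iff_lt_or_eq.mp h1 with hlt | heq
    · rw [ih hlt, List.cons_append]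
      congr 2
      simp only [List.filter_singleton]
      by_cases hP : P len
      · have : (decide (ix ≤ len) && P len) = (decide (ix + j + 1 ≤ len) && P len) := by
          simp [hP]; omega
        rw [this]
      · simp [hP]
    · subst heq
      have hLnil : (List.range (ix + j)).filter (fun i => decide (ix ≤ i) && P i) = [] := by
        rw [List.filter_eq_nil_iff]
        intro i hi
        simp only [List.mem_range] at hi
        by_cases hix : ix ≤ i
        · simp [h3 i hix hi]
        · simp [hix]
      have hRnil : (List.range (ix + j)).filter (fun i => decide (ix + j + 1 ≤ i) && P i) = [] := by
        rw [List.filter_eq_nil_iff]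
        intro i hi
        simp only [List.mem_range] at hi
        simp [show ¬ (ix + j + 1 ≤ i) by omega]
      rw [hLnil, hRnil]
      simp [h2, show ix ≤ ix + j by omega]

-- the index/count loop of get_array_parents lists the prefixes at every "[array]" position ≥ ix
theorem gap_aux_eq (key : List String) (n : Nat) : ∀ (ix : Nat),
    n = List.count "[array]" (key.drop ix) →
    pvGetArrayParentsAux key ix n
      = ((List.range key.length).filter
          (fun i => decide (ix ≤ i) && ((key.getD i "") == "[array]"))).map (fun i => key.take i) := by
  induction n with
  | zero =>
    intro ix hn
    have hnm : "[array]" ∉ key.drop ix := List.count_eq_zero.mp hn.symm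
    have : (List.range key.length).filter
        (fun i => decide (ix ≤ i) && ((key.getD i "") == "[array]")) = [] := by
      rw [List.filter_eq_nil_iff]
      intro i hi
      simp only [List.mem_range] at hi
      by_cases hix : ix ≤ i
      · have hd : i - ix < (key.drop ix).length := by simp [List.length_drop]; omega
        have heq : (key.drop ix)[i - ix] = key[i]'hi := by
          rw [List.getElem_drop]; congr 1; omega
        have hne : key[i]'hi ≠ "[array]" := by
          rw [← heq]; intro h; exact hnm (h ▸ List.getElem_mem hd)
        have hne' : key[i]?.getD "" ≠ "[array]" := by
          rw [List.getElem?_eq_getElem hi]; simpa using hne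
        simp [hix, hne']
      · simp [hix]
    rw [this]
    rfl
  | succ n ih =>
    intro ix hn
    have hmem : "[array]" ∈ key.drop ix := by
      have : 0 < List.count "[array]" (key.drop ix) := by omega
      exact List.count_pos_iff.mp this
    rcases hidx : PySem.List.index? (key.drop ix) "[array]" with _ | j
    · exact absurd (PySem.List.index?_eq_none_iff _ _ |>.mp hidx) (by simp [hmem])
    · obtain ⟨pre, suf, hdec, hpre, hnp⟩ := (PySem.List.index?_eq_some_iff _ _ _).mp hidx
      have hlend : (key.drop ix).length = key.length - ix := List.length_drop ..
      have hlen2 : (key.drop ix).length = j + 1 + suf.length := by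
        rw [hdec]; simp [hpre]; omega
      have hixj : ix + j < key.length := by omega
      have hget : key[ix + j]?.getD "" = "[array]" := by
        have h1 : key[ix + j]? = (key.drop ix)[j]? := by
          rw [List.getElem?_drop]
        have h2 : (key.drop ix)[j]? = some "[array]" := by
          rw [hdec, List.getElem?_append_right (by omega), hpre]
          simp
        rw [h1, h2]; rfl
      have hlow : ∀ m, ix ≤ m → m < ix + j → key[m]?.getD "" ≠ "[array]" := by
        intro m hm1 hm2
        have hml : m - ix < pre.length := by omega
        have h1 : key[m]? = (key.drop ix)[m - ix]? := by
          rw [List.getElem?_drop]; congr 1; omega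
        have h2 : (key.drop ix)[m - ix]? = some (pre[m - ix]'hml) := by
          rw [hdec, List.getElem?_append_left (by omega)]
          exact List.getElem?_eq_getElem hml
        have h3 : key[m]?.getD "" = pre[m - ix]'hml := by
          rw [h1, h2]
          rfl
        rw [h3]
        intro h
        exact hnp (h ▸ List.getElem_mem hml)
      have hdrop : key.drop (ix + j + 1) = suf := by
        have h1 : key.drop (ix + j + 1) = (key.drop ix).drop (j + 1) := by
          rw [List.drop_drop]
          rw [Nat.add_assoc]
        rw [h1, hdec, show pre ++ "[array]" :: suf = (pre ++ ["[array]"]) ++ suf by simp,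
          List.drop_left' (by simp [hpre])]
      have hcnt : n = List.count "[array]" (key.drop (ix + j + 1)) := by
        rw [hdrop]
        have : List.count "[array]" (key.drop ix)
            = List.count "[array]" pre + 1 + List.count "[array]" suf := by
          rw [hdec]; simp [List.count_append]; ring
        have hp0 : List.count "[array]" pre = 0 := List.count_eq_zero.mpr hnp
        omega
      have hidx' : List.idxOf? "[array]" (key.drop ix) = some j := by
        rw [← PySem.List.index?_eq_idxOf?]; exact hidx
      have hstep : pvGetArrayParentsAux key ix (n+1)
          = key.take (ix + j) :: pvGetArrayParentsAux key (ix + j + 1) n := by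
        simp [pvGetArrayParentsAux, pvListIndexFrom, hidx']
      rw [hstep, ih (ix + j + 1) hcnt,
        range_filter_step key.length ix j _ hixj (by simp [hget])
          (fun m hm1 hm2 => by simp [hlow m hm1 hm2]),
        List.map_cons]

theorem filterMap_if_eq_map_filter {α β : Type} (l : List α) (q : α → Bool) (g : α → β) :
    l.filterMap (fun i => if q i then some (g i) else none) = (l.filter q).map g := by
  induction l with
  | nil => rfl
  | cons a l ih => by_cases h : q a <;> simp [h, ih]

theorem prefixesWhere_eq (k : List String) (b : Bool) :
    prefixesWhere k b
      = ((List.range k.length).filter (fun i => ((k.getD i "") == "[array]") == b)).map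
          (fun i => k.take i) := by
  unfold prefixesWhere
  exact filterMap_if_eq_map_filter _ _ _

theorem get_array_parents_eq (k : List String) :
    get_array_parents k = prefixesWhere k true := by
  rw [prefixesWhere_eq]
  unfold get_array_parents
  rw [gap_aux_eq k _ 0 (by simp [PySem.List.count_eq])]
  congr 1
  apply List.filter_congr
  intro i _
  simp

theorem flatMap_filter_contains (keys : List (List String)) :
    (keys.filter (fun k => k.contains "[array]")).flatMap get_array_parents
      = keys.flatMap (fun k => prefixesWhere k true) := by
  induction keys with
  | nil => rfl
  | cons k ks ih =>
    by_cases h : k.contains "[array]"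
    · simp only [List.filter_cons, h, if_true, List.flatMap_cons, ih, get_array_parents_eq]
    · have hcnt : PySem.List.count k "[array]" = 0 := by
        rw [PySem.List.count_eq, List.count_eq_zero]
        simpa using h
      have hnil : prefixesWhere k true = [] := by
        rw [← get_array_parents_eq]
        unfold get_array_parents
        rw [hcnt]
        rfl
      rw [List.filter_cons, if_neg (by simpa using h), ih, List.flatMap_cons, hnil,
        List.nil_append]

theorem mem_prefixesWhere_false (k p : List String) :
    p ∈ prefixesWhere k false ↔
      ∃ i, i < k.length ∧ ¬ ((k.getD i "") = "[array]") ∧ k.take i = p := by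
  simp [prefixesWhere, List.mem_filterMap, List.mem_range]

theorem foldl_append_if_if {α : Type} (P : α → Prop) [DecidablePred P] (q : α → Bool)
    (l acc : List α) :
    l.foldl (fun res k => if P k then (if q k then res ++ [k] else res) else res) acc
      = acc ++ l.filter (fun k => decide (P k) && q k) := by
  have hfun : (fun (res : List α) k => if P k then (if q k then res ++ [k] else res) else res)
      = fun res k => if (decide (P k) && q k) = true then res ++ [id k] else res := by
    funext res k
    by_cases h1 : P k <;> by_cases h2 : q k <;> simp [h1, h2]
  rw [hfun, PySem.List.foldl_append_if _ id l acc]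
  simp

theorem loc_siblings_false_eq (p : List String) (keys : List (List String)) :
    loc_siblings p keys (some false)
      = keys.filter (fun k =>
          decide (k.length > p.length) &&
          (k.take p.length == p && ((k.getD p.length "") != "[array]"))) := by
  simp only [loc_siblings]
  exact foldl_append_if_if _ _ keys []

theorem cond_equiv (keys : List (List String)) (p : List String) :
    loc_siblings p keys (some false) ≠ [] ↔
      p ∈ keys.flatMap (fun k => prefixesWhere k false) := by
  rw [loc_siblings_false_eq]
  rw [Ne, List.filter_eq_nil_iff]
  push Not
  simp only [List.mem_flatMap]
  constructor
  · rintro ⟨k, hk, hpred⟩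
    simp only [decide_eq_true_eq, Bool.and_eq_true, beq_iff_eq, bne_iff_ne] at hpred
    obtain ⟨h1, h2, h3⟩ := hpred
    exact ⟨k, hk, (mem_prefixesWhere_false k p).mpr ⟨p.length, h1, h3, h2⟩⟩
  · rintro ⟨k, hk, hmem⟩
    obtain ⟨i, hi, hne, htake⟩ := (mem_prefixesWhere_false k p).mp hmem
    have hplen : p.length = i := by
      rw [← htake, List.length_take]
      omega
    refine ⟨k, hk, ?_⟩
    simp only [decide_eq_true_eq, Bool.and_eq_true, beq_iff_eq, bne_iff_ne]
    exact ⟨by omega, by rw [hplen, htake], by rw [hplen]; exact hne⟩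

theorem foldl_add_if_filter (C : List String → Prop) [DecidablePred C]
    (L : List (List String)) : ∀ (s0 : PySem.Set (List String)),
    L.Nodup → (∀ x ∈ L, x ∉ s0) →
    L.foldl (fun s p => if C p then s else PySem.Set.add s p) s0
      = s0 ++ L.filter (fun p => decide (¬ C p)) := by
  induction L with
  | nil => intro s0 _ _; simp
  | cons p L ih =>
    intro s0 hnd hdisj
    have hpL : p ∉ L := (List.nodup_cons.mp hnd).1
    have hndL : L.Nodup := (List.nodup_cons.mp hnd).2
    by_cases hC : C p
    · rw [List.foldl_cons, if_pos hC, List.filter_cons,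
        ih s0 hndL (fun x hx => hdisj x (List.mem_cons_of_mem _ hx))]
      simp [hC]
    · have hps0 : p ∉ s0 := hdisj p (List.mem_cons_self ..)
      rw [List.foldl_cons, if_neg hC, PySem.Set.add_of_not_mem hps0, List.filter_cons,
        ih (s0 ++ [p]) hndL (fun x hx => by
          simp only [List.mem_append, List.mem_singleton]
          rintro (h | h)
          · exact hdisj x (List.mem_cons_of_mem _ hx) h
          · exact hpL (h ▸ hx))]
      simp [hC]

-- ===== VERDICT (by name: the statement is the Claim_ definition above) =====
theorem detect_mixed_array_parents_spec : Claim_equal_detect_mixed_array_parents := by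
  intro keys _
  unfold Spec_detect_mixed_array_parents
  unfold detect_mixed_array_parents detect_mixed_array_parents_alt
  simp only [PySem.List.dedup_eq_ofList, flatMap_filter_contains]
  set L := PySem.List.sorted
      (PySem.Set.ofList (keys.flatMap (fun k => prefixesWhere k true))) (fun t => t.length) false with hL
  have hndL : L.Nodup :=
    (PySem.List.sorted_perm _ _ _).symm.nodup (PySem.Set.nodup_ofList _)
  rw [foldl_add_if_filter (fun p => loc_siblings p keys (some false) = []) L PySem.Set.empty hndL
    (by intro x _ hx; simp [PySem.Set.empty] at hx)]
  have hfeq : L.filter (fun p => decide (¬ loc_siblings p keys (some false) = []))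
      = L.filter (fun p => PySem.Set.contains
          (PySem.Set.ofList (keys.flatMap (fun k => prefixesWhere k false))) p) := by
    apply List.filter_congr
    intro p _
    by_cases h : loc_siblings p keys (some false) = []
    · have : p ∉ keys.flatMap (fun k => prefixesWhere k false) := by
        intro hm
        exact (cond_equiv keys p |>.mpr hm) h
      simp [h, PySem.Set.mem_ofList, this]
    · have : p ∈ keys.flatMap (fun k => prefixesWhere k false) :=
        (cond_equiv keys p).mp h
      simp [h, PySem.Set.mem_ofList, this]
  rw [hfeq, PySem.Set.ofList_eq_self_of_nodup _ (hndL.filter _)]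
  rfl
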